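-- pv_equiv track=rewrite | github.com/tuxicorn/confluence-markdown-exporter | exporter.py | fix_spacing_between_tables_and_text
-- ===== SOURCE A (Python) =====
-- def fix_spacing_between_tables_and_text(markdown):
--     lines = markdown.split("\n")
--     output = []
--     prev_line_was_table = False
--
--     for line in lines:
--         if line.strip().startswith("|"):
--             if not prev_line_was_table and output and output[-1].strip():
--                 output.append("")
--             output.append(line)
--             prev_line_was_table = True
--         else:
--             if prev_line_was_table and line.strip():
--                 output.append("")
--             output.append(line)
--             prev_line_was_table = False
--
--     return "\n".join(output)
-- ===== SOURCE B (Python) =====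
-- def fix_spacing_between_tables_and_text(markdown):
--     def is_table(line):
--         return line.strip().startswith("|")
--
--     lines = markdown.split("\n")
--
--     # Stage 1: segment the lines into maximal runs of same-class lines
--     # (table lines vs. non-table lines).
--     runs = []
--     i = 0
--     while i < len(lines):
--         j = i + 1
--         cls = is_table(lines[i])
--         while j < len(lines) and is_table(lines[j]) == cls:
--             j += 1
--         runs.append(lines[i:j])
--         i = j
--
--     # Stage 2: concatenate the runs; adjacent runs always differ in class, so
--     # each boundary is a table/text transition: insert one blank line iff the
--     # text-side line nearest the boundary is non-blank.
--     out = list(runs[0]) if runs else []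
--     for prev, run in zip(runs, runs[1:]):
--         text_side = prev[-1] if is_table(run[0]) else run[0]
--         if text_side.strip():
--             out.append("")
--         out.extend(run)
--     return "\n".join(out)
-- ===== Notes on version B (the rewrite author's own statement) =====
-- stated objective: alternative
-- what changed: Replaces A's single stateful pass (prev_line_was_table flag plus look-back at output[-1]) with two staged passes: first segment the lines into maximal runs of table/text lines, then concatenate the runs inserting a blank line at each run boundary whose text-side nearest line is non-blank.
import Mathlib
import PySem

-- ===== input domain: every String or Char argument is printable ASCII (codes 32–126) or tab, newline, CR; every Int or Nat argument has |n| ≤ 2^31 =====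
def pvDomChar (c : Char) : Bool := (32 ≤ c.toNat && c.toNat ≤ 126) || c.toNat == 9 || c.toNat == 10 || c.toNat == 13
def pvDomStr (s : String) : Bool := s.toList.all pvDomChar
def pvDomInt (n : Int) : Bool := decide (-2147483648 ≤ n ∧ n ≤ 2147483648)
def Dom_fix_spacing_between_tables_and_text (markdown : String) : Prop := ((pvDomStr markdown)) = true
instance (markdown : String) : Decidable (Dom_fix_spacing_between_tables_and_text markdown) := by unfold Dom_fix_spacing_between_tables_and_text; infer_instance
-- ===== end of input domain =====

-- B replaces A's single stateful pass (prev_line_was_table flag + look-back at output[-1])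
-- by two staged passes: segment the lines into maximal table/text runs, then concatenate
-- the runs inserting a blank at each boundary whose text-side nearest line is non-blank;
-- objective: alternative decomposition (same cost).


-- ===== PORT A =====
-- one loop iteration of A: state = (output, prev_line_was_table)
def pvStepA (st : List String × Bool) (line : String) : List String × Bool :=
  if PySem.Str.startswith (PySem.Str.strip line) "|" then
    let output :=
      if st.2 = false ∧ st.1 ≠ [] ∧ PySem.Str.strip (st.1.getLastD "") ≠ "" then
        st.1 ++ [""] else st.1          -- output[-1] via getLastD, guarded by output ≠ []
    (output ++ [line], true)
  else
    let output :=
      if st.2 = true ∧ PySem.Str.strip line ≠ "" then st.1 ++ [""] else st.1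
    (output ++ [line], false)

def fix_spacing_between_tables_and_text (markdown : String) : String :=
  let lines := (PySem.Str.split? markdown "\n").getD []   -- sep "\n" is nonempty, so split? is always some
  PySem.Str.join "\n" (lines.foldl pvStepA ([], false)).1

-- ===== PORT B =====
def pvIsTable (line : String) : Bool := PySem.Str.startswith (PySem.Str.strip line) "|"

-- stage 1: segment into maximal runs of same-class lines (the inner while-loop
-- scanning j forward is the takeWhile/dropWhile split of the remaining lines)
def pvSeg : List String → List (List String)
  | [] => []
  | x :: xs =>
      (x :: xs.takeWhile (fun y => pvIsTable y == pvIsTable x)) ::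
        pvSeg (xs.dropWhile (fun y => pvIsTable y == pvIsTable x))
  termination_by ls => ls.length
  decreasing_by simpa using Nat.lt_succ_of_le (List.length_dropWhile_le _ xs)

-- stage 2, one iteration: pr = (prev run, current run); prev[-1] / run[0] via getLastD/headD
def pvMergeFold (out : List String) (pr : List String × List String) : List String :=
  let text_side := if pvIsTable (pr.2.headD "") then pr.1.getLastD "" else pr.2.headD ""
  (if PySem.Str.strip text_side ≠ "" then out ++ [""] else out) ++ pr.2

def fix_spacing_between_tables_and_text_alt (markdown : String) : String :=
  let lines := (PySem.Str.split? markdown "\n").getD []   -- sep "\n" is nonempty, so split? is always some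
  let runs := pvSeg lines
  let out := match runs with | [] => [] | r0 :: _ => r0
  PySem.Str.join "\n" ((runs.zip runs.tail).foldl pvMergeFold out)

-- ===== PRECONDITION & SPEC =====
def Spec_fix_spacing_between_tables_and_text (markdown : String) (out : String) : Prop := out = fix_spacing_between_tables_and_text_alt markdown
instance (markdown : String) (out : String) : Decidable (Spec_fix_spacing_between_tables_and_text markdown out) := by unfold Spec_fix_spacing_between_tables_and_text; infer_instance

-- ===== CLAIM (what is proved, stated in full; the proofs are below) =====
def Claim_equal_fix_spacing_between_tables_and_text : Prop := ∀ (markdown : String), Dom_fix_spacing_between_tables_and_text markdown → Spec_fix_spacing_between_tables_and_text markdown (fix_spacing_between_tables_and_text markdown)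

-- ===== LEMMAS AND PROOFS =====

-- the blank (or nothing) inserted between a text line and a table line; w = previous
-- line at the boundary, x = current line
def pvBlank (w x : String) : List String :=
  if PySem.Str.strip (if pvIsTable x then w else x) ≠ "" then [""] else []

-- proof-side form of stage 2: prev run represented only by its last line w
def pvMergeAux (w : String) (acc : List String) : List (List String) → List String
  | [] => acc
  | run :: rest => pvMergeAux (run.getLastD w) (acc ++ pvBlank w (run.headD "") ++ run) rest

lemma pv_first (x : String) : pvStepA ([], false) x = ([x], pvIsTable x) := by
  simp only [pvStepA, pvIsTable]
  cases h : PySem.Str.startswith (PySem.Str.strip x) "|" <;> simp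

-- within a run (all lines of the class of x, flag = that class) A inserts nothing
lemma pv_run : ∀ (r : List String) (out : List String) (x : String),
    (∀ y ∈ r, pvIsTable y = pvIsTable x) →
    r.foldl pvStepA (out ++ [x], pvIsTable x) = (out ++ x :: r, pvIsTable x) := by
  intro r
  induction r with
  | nil => intro out x _; simp
  | cons y r' ih =>
      intro out x hr
      have hy : pvIsTable y = pvIsTable x := hr y (by simp)
      have hstep : pvStepA (out ++ [x], pvIsTable x) y = ((out ++ [x]) ++ [y], pvIsTable y) := by
        have hsx := hy
        simp only [pvStepA, pvIsTable] at hsx ⊢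
        cases h1 : PySem.Str.startswith (PySem.Str.strip y) "|" <;>
          cases h2 : PySem.Str.startswith (PySem.Str.strip x) "|" <;>
            rw [h1, h2] at hsx <;> simp_all
      have ih' := ih (out ++ [x]) y (fun z hz => (hr z (by simp [hz])).trans hy.symm)
      rw [List.foldl_cons, hstep, ← hy, ih', hy]
      simp
  
-- at a class boundary A inserts exactly pvBlank
lemma pv_boundary (o : List String) (w x : String) (h : pvIsTable x ≠ pvIsTable w) :
    pvStepA (o ++ [w], pvIsTable w) x = ((o ++ [w]) ++ pvBlank w x ++ [x], pvIsTable x) := by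
  simp only [pvStepA, pvBlank, pvIsTable] at h ⊢
  rcases Bool.eq_false_or_eq_true (PySem.Str.startswith (PySem.Str.strip x) "|") with h1 | h1 <;>
    rcases Bool.eq_false_or_eq_true (PySem.Str.startswith (PySem.Str.strip w) "|") with h2 | h2 <;>
      simp only [h1, h2] at h ⊢ <;> simp_all <;> split_ifs <;> simp_all

lemma pv_getLastD_cls : ∀ (r : List String) (x : String),
    (∀ y ∈ r, pvIsTable y = pvIsTable x) → pvIsTable (r.getLastD x) = pvIsTable x := by
  intro r
  induction r with
  | nil => intro x _; rfl
  | cons a r' ih =>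
      intro x hr
      have := ih a (fun z hz => (hr z (by simp [hz])).trans (hr a (by simp)).symm)
      simp only [List.getLastD_cons, this]
      exact hr a (by simp)

lemma pv_snoc : ∀ (r : List String) (out : List String) (x : String),
    ∃ o, out ++ x :: r = o ++ [r.getLastD x] := by
  intro r
  induction r with
  | nil => exact fun out x => ⟨out, rfl⟩
  | cons a r' ih =>
      intro out x
      obtain ⟨o, ho⟩ := ih (out ++ [x]) a
      refine ⟨o, ?_⟩
      rw [List.getLastD_cons]
      simpa using ho

lemma pv_getLastD_irrel (a : String) (l : List String) (d d' : String) :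
    (a :: l).getLastD d = (a :: l).getLastD d' := by
  simp only [List.getLastD_cons]

lemma pv_dropWhile_head (p : String → Bool) : ∀ (xs : List String),
    xs.dropWhile p ≠ [] → p ((xs.dropWhile p).headD "") = false := by
  intro xs
  induction xs with
  | nil => simp
  | cons a xs ih =>
      intro h
      by_cases ha : p a
      · rw [List.dropWhile_cons_of_pos ha] at h ⊢; exact ih h
      · rw [List.dropWhile_cons_of_neg ha]; simpa using ha

-- main invariant: after a run ending in class(x), A's remaining loop produces the
-- merge of the segmentation of the remaining lines
lemma pv_after_run : ∀ (n : ℕ) (rest' : List String), rest'.length ≤ n →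
    ∀ (r out : List String) (x : String),
    (∀ y ∈ r, pvIsTable y = pvIsTable x) →
    (rest' ≠ [] → pvIsTable (rest'.headD "") ≠ pvIsTable x) →
    ((r ++ rest').foldl pvStepA (out ++ [x], pvIsTable x)).1
      = pvMergeAux (r.getLastD x) (out ++ x :: r) (pvSeg rest') := by
  intro n
  induction n with
  | zero =>
      intro rest' hlen r out x hr _
      have : rest' = [] := List.eq_nil_of_length_eq_zero (Nat.le_zero.mp hlen)
      subst this
      rw [List.append_nil, pv_run r out x hr]
      simp [pvSeg, pvMergeAux]
  | succ n ih =>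
      intro rest' hlen r out x hr hbd
      rw [List.foldl_append, pv_run r out x hr]
      cases rest' with
      | nil => simp [pvSeg, pvMergeAux]
      | cons z zs =>
          have hzx : pvIsTable z ≠ pvIsTable x := by simpa using hbd (by simp)
          obtain ⟨o, ho⟩ := pv_snoc r out x
          have hcls := pv_getLastD_cls r x hr
          set w := r.getLastD x with hw
          have hstep : pvStepA (out ++ x :: r, pvIsTable x) z
              = ((o ++ [w]) ++ pvBlank w z ++ [z], pvIsTable z) := by
            rw [ho, ← hcls]
            exact pv_boundary o w z (by rw [hcls]; exact hzx)
          set p : String → Bool := fun y => pvIsTable y == pvIsTable z with hp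
          have hsplit : zs = zs.takeWhile p ++ zs.dropWhile p := (List.takeWhile_append_dropWhile).symm
          have htw : ∀ y ∈ zs.takeWhile p, pvIsTable y = pvIsTable z := by
            intro y hy
            have := List.mem_takeWhile_imp hy
            simpa [hp] using this
          have hdw : zs.dropWhile p ≠ [] → pvIsTable ((zs.dropWhile p).headD "") ≠ pvIsTable z := by
            intro hne h
            have h2 := pv_dropWhile_head p zs hne
            simp only [hp, beq_eq_false_iff_ne] at h2
            exact h2 h
          have hlen' : (zs.dropWhile p).length ≤ n := by
            have h1 := List.length_dropWhile_le p zs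
            simp only [List.length_cons] at hlen
            omega
          have hrec := ih (zs.dropWhile p) hlen' (zs.takeWhile p)
            ((o ++ [w]) ++ pvBlank w z) z htw hdw
          rw [List.foldl_cons, hstep]
          rw [show pvSeg (z :: zs) = (z :: zs.takeWhile p) :: pvSeg (zs.dropWhile p) from by
            rw [pvSeg]]
          conv_lhs => rw [hsplit]
          rw [show ((o ++ [w]) ++ pvBlank w z ++ [z] : List String)
              = (((o ++ [w]) ++ pvBlank w z) ++ [z]) from by simp]
          rw [hrec]
          simp only [pvMergeAux, List.getLastD_cons, List.headD_cons, ho]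
  
lemma pv_seg_ne : ∀ (n : ℕ) (ls : List String), ls.length ≤ n →
    ∀ r ∈ pvSeg ls, r ≠ [] := by
  intro n
  induction n with
  | zero =>
      intro ls hlen
      have : ls = [] := List.eq_nil_of_length_eq_zero (Nat.le_zero.mp hlen)
      subst this; simp [pvSeg]
  | succ n ih =>
      intro ls hlen r hr
      cases ls with
      | nil => simp [pvSeg] at hr
      | cons x xs =>
          rw [pvSeg] at hr
          rcases List.mem_cons.mp hr with h | h
          · subst h; simp
          · have h1 := List.length_dropWhile_le (fun y => pvIsTable y == pvIsTable x) xs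
            simp only [List.length_cons] at hlen
            exact ih _ (by omega) r h

-- B's foldl over zipped runs equals the proof-side merge
lemma pv_merge_eq : ∀ (runs : List (List String)) (prev acc : List String),
    prev ≠ [] → (∀ r ∈ runs, r ≠ []) →
    (((prev :: runs).zip runs).foldl pvMergeFold acc)
      = pvMergeAux (prev.getLastD "") acc runs := by
  intro runs
  induction runs with
  | nil => intro prev acc _ _; rfl
  | cons r1 rs ih =>
      intro prev acc hprev hne
      have hr1 : r1 ≠ [] := hne r1 (by simp)
      rw [List.zip_cons_cons, List.foldl_cons]
      have hstep : pvMergeFold acc (prev, r1)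
          = acc ++ pvBlank (prev.getLastD "") (r1.headD "") ++ r1 := by
        simp only [pvMergeFold, pvBlank, pvIsTable]
        split_ifs <;> simp_all
      have hlast : r1.getLastD (prev.getLastD "") = r1.getLastD "" := by
        cases r1 with
        | nil => exact absurd rfl hr1
        | cons a l => exact pv_getLastD_irrel a l _ _
      rw [hstep, ih r1 _ hr1 (fun r h => hne r (by simp [h]))]
      simp only [pvMergeAux, hlast]

-- ===== VERDICT (by name: the statement is the Claim_ definition above) =====
theorem fix_spacing_between_tables_and_text_spec : Claim_equal_fix_spacing_between_tables_and_text := by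
  intro markdown _
  unfold Spec_fix_spacing_between_tables_and_text
  unfold fix_spacing_between_tables_and_text fix_spacing_between_tables_and_text_alt
  cases hl : (PySem.Str.split? markdown "\n").getD [] with
  | nil => simp [pvSeg]
  | cons l0 ls =>
      simp only []
      set p : String → Bool := fun y => pvIsTable y == pvIsTable l0 with hp
      have htw : ∀ y ∈ ls.takeWhile p, pvIsTable y = pvIsTable l0 := by
        intro y hy
        have := List.mem_takeWhile_imp hy
        simpa [hp] using this
      have hdw : ls.dropWhile p ≠ [] → pvIsTable ((ls.dropWhile p).headD "") ≠ pvIsTable l0 := by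
        intro hne h
        have h2 := pv_dropWhile_head p ls hne
        simp only [hp, beq_eq_false_iff_ne] at h2
        exact h2 h
      have hA : ((l0 :: ls).foldl pvStepA ([], false)).1
          = pvMergeAux ((ls.takeWhile p).getLastD l0) (l0 :: ls.takeWhile p)
              (pvSeg (ls.dropWhile p)) := by
        rw [List.foldl_cons, pv_first]
        have := pv_after_run ls.length (ls.dropWhile p) (List.length_dropWhile_le p ls)
          (ls.takeWhile p) [] l0 htw hdw
        simpa [List.takeWhile_append_dropWhile] using this
      have hB : pvSeg (l0 :: ls)
          = (l0 :: ls.takeWhile p) :: pvSeg (ls.dropWhile p) := by rw [pvSeg]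
      rw [hA, hB]
      congr 1
      rw [List.tail_cons,
        pv_merge_eq (pvSeg (ls.dropWhile p)) (l0 :: ls.takeWhile p) (l0 :: ls.takeWhile p)
          (by simp) (pv_seg_ne (ls.dropWhile p).length _ le_rfl)]
      simp only [List.getLastD_cons]
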